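-- pv_equiv track=rewrite | github.com/MrBrantCode/unitest_baseline | mut_generate/mist_train_cf/cf_49888/solution.py | longest_common_palindromic_subsequence
-- ===== SOURCE A (Python) =====
-- def longest_common_palindromic_subsequence(string1, string2):
--     def lcs(X, Y, m, n):
--         dp = [[0 for _ in range(n + 1)] for _ in range(m + 1)]
--         for i in range(m + 1):
--             for j in range(n + 1):
--                 if i == 0 or j == 0:
--                     dp[i][j] = 0
--                 elif X[i - 1] == Y[j - 1]:
--                     dp[i][j] = dp[i - 1][j - 1] + 1
--                 else:
--                     dp[i][j] = max(dp[i - 1][j], dp[i][j - 1])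
--         return dp[m][n]
--
--     n, m = len(string1), len(string2)
--     rev_string2 = string2[::-1]
--     len_lps = lcs(string1, rev_string2, n, m)
--     return len_lps
-- ===== SOURCE B (Python) =====
-- def longest_common_palindromic_subsequence(string1, string2):
--     # Top-down memoized recursion over (i, j) instead of filling a DP matrix:
--     # only the subproblems actually reachable from (len(X), len(Y)) are computed.
--     X = string1
--     Y = string2[::-1]
--     memo = {}
--
--     def rec(i, j):
--         if i == 0 or j == 0:
--             return 0
--         key = (i, j)
--         if key in memo:
--             return memo[key]
--         if X[i - 1] == Y[j - 1]:
--             res = rec(i - 1, j - 1) + 1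
--         else:
--             res = max(rec(i - 1, j), rec(i, j - 1))
--         memo[key] = res
--         return res
--
--     return rec(len(X), len(Y))
-- ===== Notes on version B (the rewrite author's own statement) =====
-- stated objective: alternative
-- what changed: Replaces A's bottom-up tabulation over a full (m+1)x(n+1) matrix (nested index loops) with top-down recursive descent from (len(X), len(Y)) memoized in a dict, so control flow is demand-driven recursion instead of exhaustive table filling.
import Mathlib
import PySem

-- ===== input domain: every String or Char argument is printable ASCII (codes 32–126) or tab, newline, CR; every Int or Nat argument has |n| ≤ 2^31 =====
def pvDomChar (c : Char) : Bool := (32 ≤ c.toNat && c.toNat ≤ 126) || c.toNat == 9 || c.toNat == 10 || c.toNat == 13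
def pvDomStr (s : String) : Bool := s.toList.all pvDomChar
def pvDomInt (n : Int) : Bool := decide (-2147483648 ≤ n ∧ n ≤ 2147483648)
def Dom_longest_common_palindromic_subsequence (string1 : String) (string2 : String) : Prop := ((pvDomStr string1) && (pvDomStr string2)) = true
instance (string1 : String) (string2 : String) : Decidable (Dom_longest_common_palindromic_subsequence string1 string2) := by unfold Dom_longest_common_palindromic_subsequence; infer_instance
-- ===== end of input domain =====

-- B replaces A's bottom-up tabulation of a full (m+1)×(n+1) matrix by top-down
-- recursive descent from (len(X), len(Y)) memoized in a dict; same LCS value.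

-- ===== PORT A =====
-- dp[i][j] read / write; in A every access is in range, so the total forms are exact
def pvCellA (dp : List (List Int)) (i j : Int) : Int :=
  PySem.List.pyGetD (PySem.List.pyGetD dp i []) j 0

def pvSetA (dp : List (List Int)) (i j : Int) (v : Int) : List (List Int) :=
  PySem.List.pySetD dp i (PySem.List.pySetD (PySem.List.pyGetD dp i []) j v)

-- the inner helper `lcs(X, Y, m, n)` of A
def pvLcsA (X Y : List Char) (m n : Int) : Int :=
  let dp0 := (PySem.List.pyRange 0 (m+1) 1).map
    (fun _ => (PySem.List.pyRange 0 (n+1) 1).map (fun _ => (0 : Int)))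
  let dp := (PySem.List.pyRange 0 (m+1) 1).foldl (fun dp i =>
    (PySem.List.pyRange 0 (n+1) 1).foldl (fun dp j =>
      if i == 0 || j == 0 then pvSetA dp i j 0
      else if PySem.List.pyGet? X (i-1) == PySem.List.pyGet? Y (j-1) then
        pvSetA dp i j (pvCellA dp (i-1) (j-1) + 1)
      else
        pvSetA dp i j (max (pvCellA dp (i-1) j) (pvCellA dp i (j-1)))) dp) dp0
  pvCellA dp m n

def longest_common_palindromic_subsequence (string1 : String) (string2 : String) : Int :=
  let n : Int := PySem.Str.len string1
  let m : Int := PySem.Str.len string2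
  -- string2[::-1], on the character list (step -1 ≠ 0, so slice? is never none)
  let rev_string2 : List Char := (PySem.List.slice? string2.toList none none (-1)).getD []
  pvLcsA string1.toList rev_string2 n m

-- ===== PORT B =====
-- the inner helper `rec(i, j)` of B, with the memo dict threaded as state
-- (Python's closure mutates `memo`; here it is passed in and returned)
def pvRecB (X Y : List Char) : Nat → Nat → PySem.Dict (Int × Int) Int → Int × PySem.Dict (Int × Int) Int
  | i, j, memo =>
    if i = 0 ∨ j = 0 then (0, memo)
    else
      match memo.get? ((i : Int), (j : Int)) with
      | some v => (v, memo)
      | none =>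
        let rm : Int × PySem.Dict (Int × Int) Int :=
          if PySem.List.pyGet? X ((i : Int) - 1) == PySem.List.pyGet? Y ((j : Int) - 1) then
            let p := pvRecB X Y (i - 1) (j - 1) memo
            (p.1 + 1, p.2)
          else
            let p := pvRecB X Y (i - 1) j memo
            let q := pvRecB X Y i (j - 1) p.2
            (max p.1 q.1, q.2)
        (rm.1, rm.2.insert ((i : Int), (j : Int)) rm.1)
  termination_by i j _ => i + j
  decreasing_by all_goals omega

def longest_common_palindromic_subsequence_alt (string1 : String) (string2 : String) : Int :=
  let X : List Char := string1.toList
  let Y : List Char := (PySem.List.slice? string2.toList none none (-1)).getD []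
  (pvRecB X Y X.length Y.length PySem.Dict.empty).1

-- ===== PRECONDITION & SPEC =====
def Spec_longest_common_palindromic_subsequence (string1 : String) (string2 : String) (out : Int) : Prop := out = longest_common_palindromic_subsequence_alt string1 string2
instance (string1 : String) (string2 : String) (out : Int) : Decidable (Spec_longest_common_palindromic_subsequence string1 string2 out) := by unfold Spec_longest_common_palindromic_subsequence; infer_instance

-- ===== CLAIM (what is proved, stated in full; the proofs are below) =====
def Claim_equal_longest_common_palindromic_subsequence : Prop := ∀ (string1 : String) (string2 : String), Dom_longest_common_palindromic_subsequence string1 string2 → Spec_longest_common_palindromic_subsequence string1 string2 (longest_common_palindromic_subsequence string1 string2)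

-- ===== LEMMAS AND PROOFS =====

-- The common LCS-of-prefixes table, defined structurally (row i+1 from row i).
def pvLrow (X Y : List Char) (prevRow : Nat → Int) (i : Nat) : Nat → Int
  | 0 => 0
  | j+1 => if X.getD i 'a' == Y.getD j 'a' then prevRow j + 1
           else max (prevRow (j+1)) (pvLrow X Y prevRow i j)

def pvL (X Y : List Char) : Nat → Nat → Int
  | 0 => fun _ => 0
  | i+1 => pvLrow X Y (pvL X Y i) i

lemma pvL_zero (X Y : List Char) (j : Nat) : pvL X Y 0 j = 0 := rfl
lemma pvL_zero_right (X Y : List Char) (i : Nat) : pvL X Y i 0 = 0 := by cases i <;> rfl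
lemma pvL_succ_succ (X Y : List Char) (i j : Nat) :
    pvL X Y (i+1) (j+1) =
      if X.getD i 'a' == Y.getD j 'a' then pvL X Y i j + 1
      else max (pvL X Y i (j+1)) (pvL X Y (i+1) j) := rfl

-- Nat-level cell access for A's matrix
def pvGetN (dp : List (List Int)) (i j : Nat) : Int := (dp.getD i []).getD j 0
def pvSetN (dp : List (List Int)) (i j : Nat) (v : Int) : List (List Int) :=
  dp.set i ((dp.getD i []).set j v)

-- Nat-level form of A's loop body
def pvStepN (X Y : List Char) (i j : Nat) (dp : List (List Int)) : List (List Int) :=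
  if i = 0 ∨ j = 0 then pvSetN dp i j 0
  else if X.getD (i-1) 'a' == Y.getD (j-1) 'a' then
    pvSetN dp i j (pvGetN dp (i-1) (j-1) + 1)
  else
    pvSetN dp i j (max (pvGetN dp (i-1) j) (pvGetN dp i (j-1)))

lemma pvSetN_length (dp : List (List Int)) (i j : Nat) (v : Int) :
    (pvSetN dp i j v).length = dp.length := by
  simp [pvSetN]

lemma pvStepN_length (X Y : List Char) (i j : Nat) (dp : List (List Int)) :
    (pvStepN X Y i j dp).length = dp.length := by
  unfold pvStepN; split_ifs <;> simp [pvSetN_length]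

lemma getD_pvSetN_ne (dp : List (List Int)) (i j : Nat) (v : Int) (r : Nat) (hr : r ≠ i) :
    (pvSetN dp i j v).getD r [] = dp.getD r [] := by
  simp [pvSetN, List.getD_eq_getElem?_getD, List.getElem?_set_ne (by omega : i ≠ r)]

lemma getD_pvSetN_self (dp : List (List Int)) (i j : Nat) (v : Int) (hi : i < dp.length) :
    (pvSetN dp i j v).getD i [] = ((dp.getD i []).set j v) := by
  simp [pvSetN, List.getD_eq_getElem?_getD, hi]

lemma pvGetN_pvSetN_self (dp : List (List Int)) (i j : Nat) (v : Int)
    (hi : i < dp.length) (hj : j < (dp.getD i []).length) :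
    pvGetN (pvSetN dp i j v) i j = v := by
  rw [pvGetN, getD_pvSetN_self dp i j v hi]
  rw [List.getD_eq_getElem?_getD] at hj ⊢
  simp [hj]

lemma pvGetN_pvSetN_ne (dp : List (List Int)) (i j : Nat) (v : Int) (r c : Nat)
    (h : r ≠ i ∨ c ≠ j) : pvGetN (pvSetN dp i j v) r c = pvGetN dp r c := by
  rcases h with h | h
  · rw [pvGetN, getD_pvSetN_ne dp i j v r h]; rfl
  · by_cases hr : r = i
    · subst hr
      by_cases hi : r < dp.length
      · rw [pvGetN, getD_pvSetN_self dp r j v hi, pvGetN]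
        simp [List.getD_eq_getElem?_getD, List.getElem?_set_ne (by omega : j ≠ c)]
      · rw [pvGetN, pvSetN, List.set_eq_of_length_le (by omega)]; rfl
    · rw [pvGetN, getD_pvSetN_ne dp i j v r hr]; rfl


lemma pvSetN_rowlen (dp : List (List Int)) (i j : Nat) (v : Int) (r : Nat) :
    ((pvSetN dp i j v).getD r []).length = (dp.getD r []).length := by
  by_cases hr : r = i
  · subst hr
    by_cases hi : r < dp.length
    · rw [getD_pvSetN_self dp r j v hi]; simp
    · rw [pvSetN, List.set_eq_of_length_le (by omega)]
  · rw [getD_pvSetN_ne dp i j v r hr]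

lemma pvStepN_rowlen (X Y : List Char) (i j : Nat) (dp : List (List Int)) (r : Nat) :
    ((pvStepN X Y i j dp).getD r []).length = (dp.getD r []).length := by
  unfold pvStepN; split_ifs <;> apply pvSetN_rowlen

lemma pvGetN_pvStepN_ne (X Y : List Char) (i j : Nat) (dp : List (List Int)) (r c : Nat)
    (h : r ≠ i ∨ c ≠ j) : pvGetN (pvStepN X Y i j dp) r c = pvGetN dp r c := by
  unfold pvStepN; split_ifs <;> exact pvGetN_pvSetN_ne dp i j _ r c h

lemma pvGetN_pvStepN_self (X Y : List Char) (i j : Nat) (dp : List (List Int))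
    (hi : i < dp.length) (hj : j < (dp.getD i []).length) :
    pvGetN (pvStepN X Y i j dp) i j =
      if i = 0 ∨ j = 0 then 0
      else if X.getD (i-1) 'a' == Y.getD (j-1) 'a' then pvGetN dp (i-1) (j-1) + 1
      else max (pvGetN dp (i-1) j) (pvGetN dp i (j-1)) := by
  unfold pvStepN; split_ifs <;> exact pvGetN_pvSetN_self dp i j _ hi hj


lemma pvSetA_natCast (dp : List (List Int)) (i j : Nat) (v : Int) :
    pvSetA dp (i : Int) (j : Int) v = pvSetN dp i j v := by
  simp [pvSetA, pvSetN, PySem.List.pySetD_natCast, PySem.List.pyGetD_natCast]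

lemma pvCellA_natCast (dp : List (List Int)) (i j : Nat) :
    pvCellA dp (i : Int) (j : Int) = pvGetN dp i j := by
  simp [pvCellA, pvGetN, PySem.List.pyGetD_natCast]

lemma pvBodyA_natCast (X Y : List Char) (i j : Nat) (hi : i ≤ X.length) (hj : j ≤ Y.length)
    (dp : List (List Int)) :
    (if (i : Int) == 0 || (j : Int) == 0 then pvSetA dp (i : Int) (j : Int) 0
     else if PySem.List.pyGet? X ((i : Int) - 1) == PySem.List.pyGet? Y ((j : Int) - 1) then
       pvSetA dp (i : Int) (j : Int) (pvCellA dp ((i : Int) - 1) ((j : Int) - 1) + 1)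
     else pvSetA dp (i : Int) (j : Int)
            (max (pvCellA dp ((i : Int) - 1) (j : Int)) (pvCellA dp (i : Int) ((j : Int) - 1))))
    = pvStepN X Y i j dp := by
  by_cases h0 : i = 0 ∨ j = 0
  · have hb : ((i : Int) == 0 || (j : Int) == 0) = true := by
      rcases h0 with h | h <;> subst h <;> simp
    rw [hb, if_pos rfl, pvSetA_natCast, pvStepN, if_pos h0]
  · push Not at h0
    have hb : ((i : Int) == 0 || (j : Int) == 0) = false := by
      simp only [Bool.or_eq_false_iff, beq_eq_false_iff_ne, ne_eq, Int.natCast_eq_zero]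
      exact h0
    have hi1 : ((i : Int) - 1) = ((i - 1 : Nat) : Int) := by omega
    have hj1 : ((j : Int) - 1) = ((j - 1 : Nat) : Int) := by omega
    have hx : PySem.List.pyGet? X ((i : Int) - 1) = some (X.getD (i - 1) 'a') := by
      rw [hi1, PySem.List.pyGet?_natCast, List.getElem?_eq_getElem (by omega),
        List.getD_eq_getElem X 'a' (by omega)]
    have hy : PySem.List.pyGet? Y ((j : Int) - 1) = some (Y.getD (j - 1) 'a') := by
      rw [hj1, PySem.List.pyGet?_natCast, List.getElem?_eq_getElem (by omega),
        List.getD_eq_getElem Y 'a' (by omega)]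
    rw [hb, hx, hy, hi1, hj1, pvSetA_natCast, pvSetA_natCast, pvSetA_natCast, pvCellA_natCast,
      pvCellA_natCast, pvCellA_natCast, pvStepN, if_neg (not_or.mpr h0)]
    simp only [Bool.false_eq_true, if_false, Option.some_beq_some]
    rfl

-- ----- A side: the inner loop fills row i with pvL values -----
lemma pvInnerA (X Y : List Char) (i : Nat) (hi : i ≤ X.length) :
    ∀ (t j0 : Nat) (dp : List (List Int)),
      j0 + t = Y.length + 1 →
      dp.length = X.length + 1 →
      (∀ r < dp.length, (dp.getD r []).length = Y.length + 1) →
      (∀ r < i, ∀ c ≤ Y.length, pvGetN dp r c = pvL X Y r c) →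
      (∀ c < j0, pvGetN dp i c = pvL X Y i c) →
      (let dp' := (List.range' j0 t).foldl (fun dp j => pvStepN X Y i j dp) dp
       dp'.length = X.length + 1 ∧
       (∀ r < dp'.length, (dp'.getD r []).length = Y.length + 1) ∧
       (∀ r < i, ∀ c ≤ Y.length, pvGetN dp' r c = pvL X Y r c) ∧
       (∀ c < j0 + t, pvGetN dp' i c = pvL X Y i c)) := by
  intro t
  induction t with
  | zero =>
    intro j0 dp hsum hlen hrows hbelow hcur
    exact ⟨hlen, hrows, hbelow, hcur⟩
  | succ t ih =>
    intro j0 dp hsum hlen hrows hbelow hcur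
    have hidp : i < dp.length := by omega
    have hj0 : j0 ≤ Y.length := by omega
    have hjlt : j0 < (dp.getD i []).length := by rw [hrows i hidp]; omega
    rw [List.range'_succ, List.foldl_cons]
    have hstep : pvGetN (pvStepN X Y i j0 dp) i j0 = pvL X Y i j0 := by
      rw [pvGetN_pvStepN_self X Y i j0 dp hidp hjlt]
      by_cases h0 : i = 0 ∨ j0 = 0
      · rw [if_pos h0]
        rcases h0 with h | h
        · subst h; rfl
        · subst h; cases i <;> rfl
      · rw [if_neg h0]
        push Not at h0
        obtain ⟨i', rfl⟩ : ∃ i', i = i' + 1 := ⟨i - 1, by omega⟩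
        obtain ⟨j', rfl⟩ : ∃ j', j0 = j' + 1 := ⟨j0 - 1, by omega⟩
        simp only [Nat.add_sub_cancel]
        rw [pvL_succ_succ, hbelow i' (by omega) j' (by omega),
          hbelow i' (by omega) (j' + 1) (by omega), hcur j' (by omega)]
    have h1 := ih (j0 + 1) (pvStepN X Y i j0 dp) (by omega)
      (by rw [pvStepN_length]; exact hlen)
      (by intro r hr
          rw [pvStepN_rowlen]
          exact hrows r (by rwa [pvStepN_length] at hr))
      (by intro r hr c hc
          rw [pvGetN_pvStepN_ne X Y i j0 dp r c (Or.inl (by omega))]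
          exact hbelow r hr c hc)
      (by intro c hc
          by_cases hcj : c = j0
          · subst hcj; exact hstep
          · rw [pvGetN_pvStepN_ne X Y i j0 dp i c (Or.inr hcj)]
            exact hcur c (by omega))
    refine ⟨h1.1, h1.2.1, h1.2.2.1, ?_⟩
    intro c hc
    exact h1.2.2.2 c (by omega)

lemma pvOuterA (X Y : List Char) :
    ∀ (t i0 : Nat) (dp : List (List Int)),
      i0 + t = X.length + 1 →
      dp.length = X.length + 1 →
      (∀ r < dp.length, (dp.getD r []).length = Y.length + 1) →
      (∀ r < i0, ∀ c ≤ Y.length, pvGetN dp r c = pvL X Y r c) →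
      (let dp' := (List.range' i0 t).foldl
          (fun dp i => (List.range' 0 (Y.length + 1)).foldl (fun dp j => pvStepN X Y i j dp) dp) dp
       dp'.length = X.length + 1 ∧
       (∀ r < dp'.length, (dp'.getD r []).length = Y.length + 1) ∧
       (∀ r < i0 + t, ∀ c ≤ Y.length, pvGetN dp' r c = pvL X Y r c)) := by
  intro t
  induction t with
  | zero =>
    intro i0 dp hsum hlen hrows hbelow
    exact ⟨hlen, hrows, hbelow⟩
  | succ t ih =>
    intro i0 dp hsum hlen hrows hbelow
    rw [show List.range' i0 (t + 1) = i0 :: List.range' (i0 + 1) t from List.range'_succ,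
      List.foldl_cons]
    have hi0 : i0 ≤ X.length := by omega
    have h1 := pvInnerA X Y i0 hi0 (Y.length + 1) 0 dp (by omega) hlen hrows hbelow
      (by intro c hc; omega)
    have h2 := ih (i0 + 1) _ (by omega) h1.1 h1.2.1
      (by intro r hr c hc
          rcases Nat.lt_succ_iff_lt_or_eq.mp hr with h | h
          · exact h1.2.2.1 r h c hc
          · subst h; exact h1.2.2.2 c (by omega))
    refine ⟨h2.1, h2.2.1, ?_⟩
    intro r hr c hc
    exact h2.2.2 r (by omega) c hc

-- A's port computes pvL at the corner
lemma pvA_eq_pvL (X Y : List Char) :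
    pvLcsA X Y X.length Y.length = pvL X Y X.length Y.length := by
  unfold pvLcsA
  have hm : ((X.length : Int) + 1) = ((X.length + 1 : Nat) : Int) := by push_cast; ring
  have hn : ((Y.length : Int) + 1) = ((Y.length + 1 : Nat) : Int) := by push_cast; ring
  rw [hm, hn, PySem.List.pyRange_zero_natCast (X.length + 1),
    PySem.List.pyRange_zero_natCast (Y.length + 1)]
  simp only [List.foldl_map, List.map_map, Function.comp_def]
  rw [PySem.List.foldl_congr_mem _ _
      (fun dp (i : Nat) => (List.range (Y.length + 1)).foldl (fun dp j => pvStepN X Y i j dp) dp) _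
      (by intro dp i hiR
          refine PySem.List.foldl_congr_mem _ _ _ _ ?_
          intro dp' j hjR
          exact pvBodyA_natCast X Y i j
            (by simp only [List.mem_range] at hiR; omega)
            (by simp only [List.mem_range] at hjR; omega) dp')]
  have hdp0len : ((List.range (X.length + 1)).map
      (fun _ => (List.range (Y.length + 1)).map (fun _ => (0 : Int)))).length = X.length + 1 := by
    simp
  have hdp0rows : ∀ r < ((List.range (X.length + 1)).map
      (fun _ => (List.range (Y.length + 1)).map (fun _ => (0 : Int)))).length,
      (((List.range (X.length + 1)).map
        (fun _ => (List.range (Y.length + 1)).map (fun _ => (0 : Int)))).getD r []).length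
        = Y.length + 1 := by
    intro r hr
    simp at hr
    simp [List.getD_eq_getElem?_getD, hr]
  have h := pvOuterA X Y (X.length + 1) 0
    ((List.range (X.length + 1)).map (fun _ => (List.range (Y.length + 1)).map (fun _ => (0 : Int))))
    (by omega) hdp0len hdp0rows (by intro r hr; omega)
  simp only [← List.range_eq_range'] at h
  rw [pvCellA_natCast]
  exact h.2.2 X.length (by omega) Y.length (by omega)

-- ----- B side: the memoized recursion computes pvL -----
-- memo invariant: every cached value is the pvL value of its (positive) key
def pvInvB (X Y : List Char) (memo : PySem.Dict (Int × Int) Int) : Prop :=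
  ∀ k v, memo.get? k = some v → ∃ p q : Nat, k = ((p : Int), (q : Int)) ∧ v = pvL X Y p q

lemma pvRecB_correct (X Y : List Char) :
    ∀ (N i j : Nat) (memo : PySem.Dict (Int × Int) Int),
      i + j ≤ N → i ≤ X.length → j ≤ Y.length → pvInvB X Y memo →
      (pvRecB X Y i j memo).1 = pvL X Y i j ∧ pvInvB X Y (pvRecB X Y i j memo).2 := by
  intro N
  induction N with
  | zero =>
    intro i j memo hN hi hj hinv
    have hi0 : i = 0 := by omega
    subst hi0
    rw [pvRecB, if_pos (Or.inl rfl)]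
    exact ⟨(pvL_zero X Y j).symm, hinv⟩
  | succ N ih =>
    intro i j memo hN hi hj hinv
    by_cases h0 : i = 0 ∨ j = 0
    · rw [pvRecB, if_pos h0]
      refine ⟨?_, hinv⟩
      rcases h0 with h | h
      · subst h; exact (pvL_zero X Y j).symm
      · subst h; exact (pvL_zero_right X Y i).symm
    · push Not at h0
      rw [pvRecB, if_neg (not_or.mpr h0)]
      cases hget : memo.get? ((i : Int), (j : Int)) with
      | some v =>
        obtain ⟨p, q, hk, hv⟩ := hinv _ v hget
        have hpi : p = i := by
          have := congrArg Prod.fst hk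
          simpa using this.symm
        have hqj : q = j := by
          have := congrArg Prod.snd hk
          simpa using this.symm
        subst hpi; subst hqj
        exact ⟨hv, hinv⟩
      | none =>
        obtain ⟨i', rfl⟩ : ∃ i', i = i' + 1 := ⟨i - 1, by omega⟩
        obtain ⟨j', rfl⟩ : ∃ j', j = j' + 1 := ⟨j - 1, by omega⟩
        have hi1 : (((i' + 1 : Nat) : Int) - 1) = ((i' : Nat) : Int) := by push_cast; ring
        have hj1 : (((j' + 1 : Nat) : Int) - 1) = ((j' : Nat) : Int) := by push_cast; ring
        have hx : PySem.List.pyGet? X (((i' + 1 : Nat) : Int) - 1) = some (X.getD i' 'a') := by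
          rw [hi1, PySem.List.pyGet?_natCast, List.getElem?_eq_getElem (by omega),
            List.getD_eq_getElem X 'a' (by omega)]
        have hy : PySem.List.pyGet? Y (((j' + 1 : Nat) : Int) - 1) = some (Y.getD j' 'a') := by
          rw [hj1, PySem.List.pyGet?_natCast, List.getElem?_eq_getElem (by omega),
            List.getD_eq_getElem Y 'a' (by omega)]
        simp only [hx, hy, Option.some_beq_some, Nat.add_sub_cancel]
        -- the result/memo pair of the branch equals (pvL (i'+1) (j'+1), good memo)
        have hbranch :
            (if (X.getD i' 'a' == Y.getD j' 'a') = true then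
               let p := pvRecB X Y i' j' memo
               (p.1 + 1, p.2)
             else
               let p := pvRecB X Y i' (j' + 1) memo
               let q := pvRecB X Y (i' + 1) j' p.2
               (max p.1 q.1, q.2)).1 = pvL X Y (i' + 1) (j' + 1) ∧
            pvInvB X Y
              (if (X.getD i' 'a' == Y.getD j' 'a') = true then
                 let p := pvRecB X Y i' j' memo
                 (p.1 + 1, p.2)
               else
                 let p := pvRecB X Y i' (j' + 1) memo
                 let q := pvRecB X Y (i' + 1) j' p.2
                 (max p.1 q.1, q.2)).2 := by
          by_cases hc : (X.getD i' 'a' == Y.getD j' 'a') = true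
          · rw [if_pos hc]
            have h1 := ih i' j' memo (by omega) (by omega) (by omega) hinv
            constructor
            · show (pvRecB X Y i' j' memo).1 + 1 = _
              rw [pvL_succ_succ, if_pos hc, h1.1]
            · exact h1.2
          · rw [if_neg hc]
            have h1 := ih i' (j' + 1) memo (by omega) (by omega) (by omega) hinv
            have h2 := ih (i' + 1) j' (pvRecB X Y i' (j' + 1) memo).2 (by omega) (by omega)
              (by omega) h1.2
            constructor
            · show max (pvRecB X Y i' (j' + 1) memo).1 _ = _
              rw [pvL_succ_succ, if_neg hc, h1.1, h2.1]
            · exact h2.2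
          -- (end of branch analysis)
        refine ⟨hbranch.1, ?_⟩
        intro k v hkv
        rw [PySem.Dict.get?_insert] at hkv
        by_cases hk : k = (((i' + 1 : Nat) : Int), ((j' + 1 : Nat) : Int))
        · rw [if_pos hk] at hkv
          exact ⟨i' + 1, j' + 1, hk, by
            have := Option.some.inj hkv
            rw [← this, hbranch.1]⟩
        · rw [if_neg hk] at hkv
          exact hbranch.2 k v hkv

lemma pvB_eq_pvL (X Y : List Char) :
    (pvRecB X Y X.length Y.length PySem.Dict.empty).1 = pvL X Y X.length Y.length := by
  exact (pvRecB_correct X Y (X.length + Y.length) X.length Y.length PySem.Dict.empty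
    (le_refl _) (le_refl _) (le_refl _)
    (by intro k v h; simp [PySem.Dict.get?_empty] at h)).1

-- ===== VERDICT (by name: the statement is the Claim_ definition above) =====
theorem longest_common_palindromic_subsequence_spec : Claim_equal_longest_common_palindromic_subsequence := by
  intro string1 string2 _
  unfold Spec_longest_common_palindromic_subsequence
  unfold longest_common_palindromic_subsequence longest_common_palindromic_subsequence_alt
  simp only [PySem.List.slice?_none_none_neg_one, Option.getD_some, PySem.Str.len_eq]
  rw [show ((string2.toList.length : Int)) = ((string2.toList.reverse.length : Int)) by simp]
  rw [pvA_eq_pvL string1.toList string2.toList.reverse,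
    pvB_eq_pvL string1.toList string2.toList.reverse]
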